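-- pv_equiv track=rewrite | github.com/svianaj/DCMDB | dcmdb/src/helpers.py | merge_dict_items
-- ===== SOURCE A (Python) =====
-- def merge_dict_items(d: dict):
--     """
--     Merge
--
--     Inputs
--     ------
--     d: dict
--         A dictionary whose first level values are dicts that shall be merged.
--
--     Returns
--     -------
--     dict
--         A dictionary with the first level keys dropped and their referenced dicts merged.
--
--     Example
--     -------
--     >>> d = {
--     ...     "a": {"b": {"c": 1}},
--     ...     "x": {"b": {"c": 2}},
--     ...     "y": {"d": {"c": 3}},
--     ... }
--     >>> merge_dict_items(d)
--     {'b': {'c': 2}, 'd': {'c': 3}}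
--     """
--     merged_dict = {}
--     for key in d:
--         for sub_dict in d[key]:
--             if sub_dict in merged_dict:
--                 merged_dict[sub_dict].update(d[key][sub_dict])
--             else:
--                 merged_dict[sub_dict] = d[key][sub_dict]
--     return merged_dict
-- ===== SOURCE B (Python) =====
-- def merge_dict_items(d: dict):
--     """Two-pass re-implementation: first group the inner dicts by sub-key,
--     then merge each group (base = the first inner dict object, mutated in
--     place by .update, exactly as the original does)."""
--     groups = {}
--     for key in d:
--         for sub_key in d[key]:
--             groups.setdefault(sub_key, []).append(d[key][sub_key])
--     merged_dict = {}
--     for sub_key, dicts in groups.items():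
--         base = dicts[0]
--         for extra in dicts[1:]:
--             base.update(extra)
--         merged_dict[sub_key] = base
--     return merged_dict
-- ===== Notes on version B (the rewrite author's own statement) =====
-- stated objective: alternative
-- what changed: A interleaves lookup-update-or-insert in one nested loop; B first builds a grouping index mapping each sub-key to the ordered list of inner dicts, then merges each group in a separate reduce pass.
import Mathlib
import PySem

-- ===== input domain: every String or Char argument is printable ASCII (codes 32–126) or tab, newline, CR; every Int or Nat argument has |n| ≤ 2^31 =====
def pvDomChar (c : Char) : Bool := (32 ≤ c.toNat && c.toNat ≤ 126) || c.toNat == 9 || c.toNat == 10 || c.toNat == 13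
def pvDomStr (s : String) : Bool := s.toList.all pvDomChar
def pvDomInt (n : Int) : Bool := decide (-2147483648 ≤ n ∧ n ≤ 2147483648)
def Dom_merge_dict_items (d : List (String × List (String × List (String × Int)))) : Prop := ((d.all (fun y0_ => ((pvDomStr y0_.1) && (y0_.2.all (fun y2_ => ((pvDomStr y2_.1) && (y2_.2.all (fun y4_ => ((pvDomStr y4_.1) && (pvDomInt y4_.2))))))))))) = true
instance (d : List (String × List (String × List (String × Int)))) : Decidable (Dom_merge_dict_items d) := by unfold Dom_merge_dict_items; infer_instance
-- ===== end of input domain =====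

-- B replaces A's single interleaved lookup-update-or-insert loop by a grouping pass
-- (sub-key -> ordered list of inner dicts) followed by a per-group reduce pass;
-- same cost, different decomposition.  Both A and B mutate the inner dicts of the
-- input in place; the equivalence proved here is about the RETURN value only
-- (B performs the same in-place mutations as A).


-- ===== PORT A =====
-- merged_dict = {}; for key in d: for sub_dict in d[key]:
--   if sub_dict in merged_dict: merged_dict[sub_dict].update(d[key][sub_dict])
--   else: merged_dict[sub_dict] = d[key][sub_dict]
-- (under Pre_ each assoc list has distinct keys, so iterating the pairs of d[key]
--  is exactly Python's 'for sub_dict in d[key]: … d[key][sub_dict]')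
def merge_dict_items (d : List (String × List (String × List (String × Int)))) : List (String × List (String × Int)) :=
  (d.foldl (fun merged kv =>
      kv.2.foldl (fun merged sv =>
        match merged.get? sv.1 with
        | some w => merged.insert sv.1 (w.update sv.2)
        | none   => merged.insert sv.1 (PySem.Dict.mk sv.2)) merged)
      PySem.Dict.empty).items.map (fun p => (p.1, p.2.items))

-- ===== PORT B =====
-- merge one group: base = dicts[0]; for extra in dicts[1:]: base.update(extra)
def mergeGroup (l : List (List (String × Int))) : PySem.Dict String Int :=
  match l with
  | [] => PySem.Dict.empty
  | base :: rest => rest.foldl (fun b extra => b.update extra) (PySem.Dict.mk base)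

-- groups = {}; for key in d: for sub_key in d[key]:
--   groups.setdefault(sub_key, []).append(d[key][sub_key])
-- then merged_dict[sub_key] = reduce-with-update of each group
def merge_dict_items_alt (d : List (String × List (String × List (String × Int)))) : List (String × List (String × Int)) :=
  (d.foldl (fun g kv =>
      kv.2.foldl (fun g sv => g.modify sv.1 [] (· ++ [sv.2])) g)
      PySem.Dict.empty).items.map (fun p => (p.1, (mergeGroup p.2).items))

-- ===== PRECONDITION & SPEC =====
-- Pre_ only requires the association lists to genuinely encode Python dicts
-- (distinct keys at every level); it excludes no input the Python A accepts,
-- since a Python dict cannot carry duplicate keys.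
def Pre_merge_dict_items (d : List (String × List (String × List (String × Int)))) : Prop :=
  (d.map Prod.fst).Nodup ∧
    ∀ p ∈ d, (p.2.map Prod.fst).Nodup ∧ ∀ q ∈ p.2, (q.2.map Prod.fst).Nodup
instance (d : List (String × List (String × List (String × Int)))) : Decidable (Pre_merge_dict_items d) := by unfold Pre_merge_dict_items; infer_instance

def pvWitness_merge_dict_items : (List (String × List (String × List (String × Int)))) :=
  [("a", [("b", [("c", 1)])]), ("x", [("b", [("c", 2)]), ("d", [("e", 3)])])]

def Spec_merge_dict_items (d : List (String × List (String × List (String × Int)))) (out : List (String × List (String × Int))) : Prop := out = merge_dict_items_alt d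
instance (d : List (String × List (String × List (String × Int)))) (out : List (String × List (String × Int))) : Decidable (Spec_merge_dict_items d out) := by unfold Spec_merge_dict_items; infer_instance

-- ===== CLAIM (what is proved, stated in full; the proofs are below) =====
def Claim_equal_merge_dict_items : Prop := ∀ (d : List (String × List (String × List (String × Int)))), Dom_merge_dict_items d → Pre_merge_dict_items d → Spec_merge_dict_items d (merge_dict_items d)

-- ===== LEMMAS AND PROOFS =====

-- value-map on a Dict (key-preserving)
def mapVal {α β : Type} (f : α → β) (g : PySem.Dict String α) : PySem.Dict String β :=
  PySem.Dict.mk (g.items.map (fun p => (p.1, f p.2)))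

theorem get?_mapVal {α β : Type} (f : α → β) (g : PySem.Dict String α) (k : String) :
    (mapVal f g).get? k = (g.get? k).map f := by
  obtain ⟨l⟩ := g
  induction l with
  | nil => rfl
  | cons p rest ih =>
    obtain ⟨k', v⟩ := p
    simp only [mapVal, List.map_cons, PySem.Dict.get?_mk_cons] at *
    by_cases h : (k' == k) = true
    · simp [h]
    · simp only [if_neg h]
      exact ih

theorem contains_mapVal {α β : Type} (f : α → β) (g : PySem.Dict String α) (k : String) :
    (mapVal f g).contains k = g.contains k := by
  rw [PySem.Dict.contains_eq_isSome_get?, PySem.Dict.contains_eq_isSome_get?, get?_mapVal]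
  cases g.get? k <;> rfl

theorem insert_mapVal {α β : Type} (f : α → β) (g : PySem.Dict String α) (k : String) (v : α) :
    mapVal f (g.insert k v) = (mapVal f g).insert k (f v) := by
  apply PySem.Dict.ext
  have hc := contains_mapVal f g k
  by_cases h : g.contains k = true
  · have h' : (mapVal f g).contains k = true := by rw [hc]; exact h
    show (mapVal f (g.insert k v)).items = _
    rw [PySem.Dict.items_insert_of_contains _ _ h']
    simp only [mapVal, PySem.Dict.items_insert_of_contains _ _ h]
    simp only [List.map_map]
    apply List.map_congr_left
    intro p _
    by_cases hp : p.1 = k <;> simp [hp]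
  · have h' : (mapVal f g).contains k = false := by rw [hc]; simpa using h
    show (mapVal f (g.insert k v)).items = _
    rw [PySem.Dict.items_insert_of_not_contains _ _ h']
    simp only [mapVal, PySem.Dict.items_insert_of_not_contains _ _ (by simpa using h)]
    simp

-- one inner step of A (on the merged dict) matches one inner step of B (on the index)
def astep (m : PySem.Dict String (PySem.Dict String Int)) (sv : String × List (String × Int)) :
    PySem.Dict String (PySem.Dict String Int) :=
  match m.get? sv.1 with
  | some w => m.insert sv.1 (w.update sv.2)
  | none   => m.insert sv.1 (PySem.Dict.mk sv.2)

def gstep (g : PySem.Dict String (List (List (String × Int)))) (sv : String × List (String × Int)) :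
    PySem.Dict String (List (List (String × Int))) :=
  g.modify sv.1 [] (· ++ [sv.2])

def MInv (g : PySem.Dict String (List (List (String × Int))))
    (m : PySem.Dict String (PySem.Dict String Int)) : Prop :=
  m = mapVal mergeGroup g ∧ ∀ w ∈ g.values, w ≠ []

theorem mergeGroup_append (l : List (List (String × Int))) (v : List (String × Int)) (h : l ≠ []) :
    mergeGroup (l ++ [v]) = (mergeGroup l).update v := by
  obtain ⟨b, rest, rfl⟩ := List.exists_cons_of_ne_nil h
  simp [mergeGroup, List.foldl_append]

theorem step_Inv (g : PySem.Dict String (List (List (String × Int))))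
    (m : PySem.Dict String (PySem.Dict String Int)) (sv : String × List (String × Int))
    (h : MInv g m) : MInv (gstep g sv) (astep m sv) := by
  obtain ⟨hm, hne⟩ := h
  have hmod : gstep g sv = g.insert sv.1 ((g.getD sv.1 []) ++ [sv.2]) := rfl
  constructor
  · subst hm
    rw [hmod, insert_mapVal]
    unfold astep
    rw [get?_mapVal]
    cases hg : g.get? sv.1 with
    | none =>
      simp only [Option.map_none]
      rw [PySem.Dict.getD_of_get?_eq_none _ _ hg]
      rfl
    | some l =>
      simp only [Option.map_some]
      rw [PySem.Dict.getD_of_get?_eq_some _ _ hg]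
      have hlne : l ≠ [] := hne l (by
        have hmem : (sv.1, l) ∈ g.items := PySem.Dict.mem_items_of_get?_eq_some _ hg
        show l ∈ g.items.map Prod.snd
        exact List.mem_map.mpr ⟨(sv.1, l), hmem, rfl⟩)
      rw [mergeGroup_append l sv.2 hlne]
  · intro w hw
    rw [hmod] at hw
    rcases PySem.Dict.mem_values_insert _ _ _ _ hw with h1 | h1
    · subst h1; simp
    · exact hne w h1

theorem foldl_inner_Inv (l : List (String × List (String × Int)))
    (g : PySem.Dict String (List (List (String × Int))))
    (m : PySem.Dict String (PySem.Dict String Int)) (h : MInv g m) :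
    MInv (l.foldl gstep g) (l.foldl astep m) := by
  induction l generalizing g m with
  | nil => exact h
  | cons sv rest ih => exact ih _ _ (step_Inv g m sv h)

theorem foldl_outer_Inv (d : List (String × List (String × List (String × Int))))
    (g : PySem.Dict String (List (List (String × Int))))
    (m : PySem.Dict String (PySem.Dict String Int)) (h : MInv g m) :
    MInv (d.foldl (fun g kv => kv.2.foldl gstep g) g)
        (d.foldl (fun m kv => kv.2.foldl astep m) m) := by
  induction d generalizing g m with
  | nil => exact h
  | cons kv rest ih => exact ih _ _ (foldl_inner_Inv kv.2 g m h)

-- ===== VERDICT (by name: the statement is the Claim_ definition above) =====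
theorem merge_dict_items_spec : Claim_equal_merge_dict_items := by
  intro d _ _
  show merge_dict_items d = merge_dict_items_alt d
  have h0 : MInv PySem.Dict.empty PySem.Dict.empty :=
    ⟨rfl, by intro w hw; simp [PySem.Dict.values, PySem.Dict.empty] at hw⟩
  obtain ⟨hm, -⟩ := foldl_outer_Inv d PySem.Dict.empty PySem.Dict.empty h0
  show (List.foldl (fun m kv => kv.2.foldl astep m) PySem.Dict.empty d).items.map
        (fun p => (p.1, p.2.items)) =
      (List.foldl (fun g kv => kv.2.foldl gstep g) PySem.Dict.empty d).items.map
        (fun p => (p.1, (mergeGroup p.2).items))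
  rw [hm]
  simp only [mapVal]
  rw [List.map_map]
  rfl
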